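-- pv_equiv track=rewrite | github.com/zhendong-nexusflow/ComplexFuncBench | runner/base_runner.py | get_success_turn
-- ===== SOURCE A (Python) =====
-- def get_success_turn(remain_fcs, total_fcs):
--     remain_ids = []
--     for idx, fc_list in enumerate(total_fcs):
--         for remain_fc in remain_fcs:
--             if remain_fc in fc_list:
--                 remain_ids.append(idx)
--     if remain_ids == []:
--         return len(total_fcs)
--
--     return max(min(remain_ids), 0)
-- ===== SOURCE B (Python) =====
-- def get_success_turn(remain_fcs, total_fcs):
--     for idx, fc_list in enumerate(total_fcs):
--         if any(remain_fc in fc_list for remain_fc in remain_fcs):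
--             return idx
--     return len(total_fcs)
-- ===== Notes on version B (the rewrite author's own statement) =====
-- stated objective: simpler
-- what changed: Replaces the collect-all-matching-indices-then-max(min,0) reduction with a single short-circuiting scan that returns the first matching turn index directly (or len(total_fcs) if none).
import Mathlib
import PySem

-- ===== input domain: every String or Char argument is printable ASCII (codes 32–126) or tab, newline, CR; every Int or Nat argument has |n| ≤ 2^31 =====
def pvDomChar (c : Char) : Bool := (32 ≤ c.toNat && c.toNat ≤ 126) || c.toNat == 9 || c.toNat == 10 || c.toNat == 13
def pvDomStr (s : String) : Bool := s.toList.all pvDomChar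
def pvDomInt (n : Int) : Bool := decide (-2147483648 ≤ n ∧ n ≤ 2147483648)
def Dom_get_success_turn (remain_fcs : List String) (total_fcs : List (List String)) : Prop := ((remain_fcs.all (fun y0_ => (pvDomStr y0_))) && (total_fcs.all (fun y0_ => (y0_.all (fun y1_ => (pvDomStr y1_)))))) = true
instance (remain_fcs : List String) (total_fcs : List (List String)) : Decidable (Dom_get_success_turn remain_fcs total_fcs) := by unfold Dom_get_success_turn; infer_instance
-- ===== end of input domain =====

-- B replaces A's collect-all-indices-then-max(min,·,0) reduction by a single
-- short-circuiting scan returning the first matching turn index (objective: simpler).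

-- ===== PORT A =====
-- literal port: remain_ids built by nested loops, then `== []` test, then max(min(ids),0)
def get_success_turn (remain_fcs : List String) (total_fcs : List (List String)) : Int :=
  let remain_ids : List Int :=
    (PySem.List.enumerate total_fcs 0).foldl
      (fun acc p =>
        remain_fcs.foldl (fun a remain_fc => if p.2.contains remain_fc then a ++ [p.1] else a) acc)
      []
  if remain_ids = [] then (total_fcs.length : Int)
  else
    match PySem.List.min? remain_ids (fun x => x) with
    | some m => max m 0
    | none => 0   -- unreachable: guarded by the emptiness test above (Python's min would raise)

-- ===== PORT B =====
-- literal port of Source B: short-circuiting scan carrying the current index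
def get_success_turn_altGo (remain_fcs : List String) : List (List String) → Int → Int
  | [], idx => idx
  | fc_list :: rest, idx =>
      if remain_fcs.any (fun remain_fc => fc_list.contains remain_fc) then idx
      else get_success_turn_altGo remain_fcs rest (idx + 1)

def get_success_turn_alt (remain_fcs : List String) (total_fcs : List (List String)) : Int :=
  get_success_turn_altGo remain_fcs total_fcs 0

-- ===== PRECONDITION & SPEC =====
def Spec_get_success_turn (remain_fcs : List String) (total_fcs : List (List String)) (out : Int) : Prop := out = get_success_turn_alt remain_fcs total_fcs
instance (remain_fcs : List String) (total_fcs : List (List String)) (out : Int) : Decidable (Spec_get_success_turn remain_fcs total_fcs out) := by unfold Spec_get_success_turn; infer_instance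

-- ===== CLAIM (what is proved, stated in full; the proofs are below) =====
def Claim_equal_get_success_turn : Prop := ∀ (remain_fcs : List String) (total_fcs : List (List String)), Dom_get_success_turn remain_fcs total_fcs → Spec_get_success_turn remain_fcs total_fcs (get_success_turn remain_fcs total_fcs)

-- ===== LEMMAS AND PROOFS =====

-- the indices A appends for one enumerated turn
def pvHits (remain_fcs : List String) (p : Int × List String) : List Int :=
  (remain_fcs.filter (fun r => p.2.contains r)).map (fun _ => p.1)

theorem pvHits_mem {remain_fcs : List String} {p : Int × List String} {m : Int}
    (h : m ∈ pvHits remain_fcs p) : m = p.1 := by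
  unfold pvHits at h
  rcases List.mem_map.1 h with ⟨r, _, rfl⟩
  rfl

theorem pvIds_ge (remain_fcs : List String) (fcs : List (List String)) (s : Int) :
    ∀ m ∈ (PySem.List.enumerate fcs s).flatMap (pvHits remain_fcs), s ≤ m := by
  intro m hm
  rcases List.mem_flatMap.1 hm with ⟨p, hp, hmp⟩
  rcases (PySem.List.mem_enumerate_iff _ _ _).1 hp with ⟨k, hk, rfl⟩
  rw [pvHits_mem hmp]
  omega

theorem foldl_min_of_le (t : List Int) (a : Int) (h : ∀ y ∈ t, a ≤ y) :
    t.foldl min a = a := by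
  induction t with
  | nil => rfl
  | cons x xs ih =>
      simp only [List.foldl_cons]
      rw [min_eq_left (h x (by simp))]
      exact ih (fun y hy => h y (List.mem_cons_of_mem _ hy))

-- main invariant: A's tail computation from start index s equals B's scan from s
theorem pv_main (remain_fcs : List String) (fcs : List (List String)) (s : Int) (hs : 0 ≤ s) :
    (let ids := (PySem.List.enumerate fcs s).flatMap (pvHits remain_fcs)
     if ids = [] then s + (fcs.length : Int)
     else match PySem.List.min? ids (fun x => x) with
          | some m => max m 0
          | none => 0) = get_success_turn_altGo remain_fcs fcs s := by
  induction fcs generalizing s with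
  | nil => simp [get_success_turn_altGo, PySem.List.enumerate_nil]
  | cons fc rest ih =>
      simp only [PySem.List.enumerate_cons, List.flatMap_cons]
      by_cases h : remain_fcs.any (fun r => fc.contains r) = true
      · -- this turn matches: hits nonempty, every later index ≥ s, so min = s
        have hne : remain_fcs.filter (fun r => fc.contains r) ≠ [] := by
          rcases List.any_eq_true.1 h with ⟨r, hr, hc⟩
          intro hnil
          exact (List.filter_eq_nil_iff.1 hnil) r hr hc
        obtain ⟨r0, rs, hfil⟩ := List.exists_cons_of_ne_nil hne
        have hhits : pvHits remain_fcs (s, fc) = s :: rs.map (fun _ => s) := by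
          unfold pvHits; rw [hfil]; rfl
        simp only [get_success_turn_altGo, h, if_pos]
        rw [hhits]
        have hcons : (s :: rs.map (fun _ => s)) ++ (PySem.List.enumerate rest (s+1)).flatMap (pvHits remain_fcs)
            = s :: (rs.map (fun _ => s) ++ (PySem.List.enumerate rest (s+1)).flatMap (pvHits remain_fcs)) := rfl
        simp only [hcons]
        rw [if_neg (by simp)]
        rw [PySem.List.min?_id_cons]
        have hmin : (rs.map (fun _ => s) ++ (PySem.List.enumerate rest (s+1)).flatMap (pvHits remain_fcs)).foldl min s = s := by
          apply foldl_min_of_le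
          intro y hy
          rcases List.mem_append.1 hy with hy | hy
          · rcases List.mem_map.1 hy with ⟨_, _, rfl⟩; exact le_refl s
          · have := pvIds_ge remain_fcs rest (s+1) y hy; omega
        rw [hmin]
        exact max_eq_left hs
      · -- no match in this turn: hits empty, recurse
        have hfil : remain_fcs.filter (fun r => fc.contains r) = [] :=
          List.filter_eq_nil_iff.2 (fun r hr hc =>
            h (List.any_eq_true.2 ⟨r, hr, hc⟩))
        have hhits : pvHits remain_fcs (s, fc) = [] := by
          unfold pvHits; rw [hfil]; rfl
        simp only [get_success_turn_altGo, h, if_neg, Bool.false_eq_true, not_false_iff]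
        rw [hhits, List.nil_append]
        have := ih (s + 1) (by omega)
        simp only at this
        rw [show s + ((fc :: rest).length : Int) = (s + 1) + (rest.length : Int) by simp; omega]
        exact this

theorem pv_A_eq (remain_fcs : List String) (total_fcs : List (List String)) :
    get_success_turn remain_fcs total_fcs = get_success_turn_alt remain_fcs total_fcs := by
  unfold get_success_turn get_success_turn_alt
  have hfold :
      (PySem.List.enumerate total_fcs 0).foldl
        (fun acc p =>
          remain_fcs.foldl (fun a remain_fc => if p.2.contains remain_fc then a ++ [p.1] else a) acc)
        ([] : List Int)
      = (PySem.List.enumerate total_fcs 0).flatMap (pvHits remain_fcs) := by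
    have hinner : ∀ (p : Int × List String) (acc : List Int),
        remain_fcs.foldl (fun a remain_fc => if p.2.contains remain_fc then a ++ [p.1] else a) acc
        = acc ++ pvHits remain_fcs p := by
      intro p acc
      unfold pvHits
      exact PySem.List.foldl_append_if (fun r => p.2.contains r) (fun _ => p.1) remain_fcs acc
    calc (PySem.List.enumerate total_fcs 0).foldl
          (fun acc p =>
            remain_fcs.foldl (fun a remain_fc => if p.2.contains remain_fc then a ++ [p.1] else a) acc)
          ([] : List Int)
        = (PySem.List.enumerate total_fcs 0).foldl (fun acc p => acc ++ pvHits remain_fcs p) [] := by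
          apply PySem.List.foldl_congr_mem
          intro acc p _
          exact hinner p acc
      _ = [] ++ (PySem.List.enumerate total_fcs 0).flatMap (pvHits remain_fcs) :=
          PySem.List.foldl_append_eq_flatMap _ _ _
      _ = (PySem.List.enumerate total_fcs 0).flatMap (pvHits remain_fcs) := List.nil_append _
  simp only [hfold]
  have := pv_main remain_fcs total_fcs 0 (le_refl 0)
  simp only at this
  rw [← this]
  simp

-- ===== VERDICT (by name: the statement is the Claim_ definition above) =====
theorem get_success_turn_spec : Claim_equal_get_success_turn := by
  intro remain_fcs total_fcs _
  unfold Spec_get_success_turn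
  exact pv_A_eq remain_fcs total_fcs
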